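-- pv_equiv track=rewrite | github.com/Jaeyeop-Jung/CodingTest | 코딩테스트/프로그래머스/카카오모빌리티/2번.py | solution
-- ===== SOURCE A (Python) =====
-- def solution(id_list, k):
--     numberOfCouponEachUser = {}
--     result = 0
--     for each_id_list in id_list:
--         id_list_by_day = set(each_id_list.split(' '))
--         for id in id_list_by_day:
--             if id in numberOfCouponEachUser and numberOfCouponEachUser[id] < k:
--                 numberOfCouponEachUser[id] += 1
--                 result += 1
--             elif id not in numberOfCouponEachUser:
--                 numberOfCouponEachUser[id] = 1
--                 result += 1
--     return result
-- ===== SOURCE B (Python) =====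
-- def solution(id_list, k):
--     # Two-phase: count per-day-distinct appearances first, then cap in one aggregation.
--     # The cap is max(k, 1): the first coupon is always granted, further ones only up to k.
--     cap = max(k, 1)
--     counts = {}
--     for day in id_list:
--         for i in set(day.split(' ')):
--             counts[i] = counts.get(i, 0) + 1
--     return sum(min(c, cap) for c in counts.values())
-- ===== Notes on version B (the rewrite author's own statement) =====
-- stated objective: simpler
-- what changed: Replaces A's interleaved increment-and-cap with a running result by a two-phase computation: build a plain per-user count dictionary in one scan, then return sum(min(c, max(k,1))) in a closing aggregation (max(k,1) because A always grants a user's first coupon even when k <= 0).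
import Mathlib
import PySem

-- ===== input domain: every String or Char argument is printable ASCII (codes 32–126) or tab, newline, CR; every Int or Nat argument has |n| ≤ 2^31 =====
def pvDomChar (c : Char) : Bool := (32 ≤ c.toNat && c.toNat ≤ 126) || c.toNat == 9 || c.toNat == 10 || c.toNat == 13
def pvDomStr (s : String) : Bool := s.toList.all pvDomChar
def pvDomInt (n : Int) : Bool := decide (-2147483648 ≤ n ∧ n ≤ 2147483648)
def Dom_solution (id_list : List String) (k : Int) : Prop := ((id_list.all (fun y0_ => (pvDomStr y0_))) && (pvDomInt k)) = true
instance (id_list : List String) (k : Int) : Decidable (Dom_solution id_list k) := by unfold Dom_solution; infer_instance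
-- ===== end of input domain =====

-- B replaces A's interleaved increment-and-cap with a two-phase count-then-cap aggregation (same cost; return value only, no mutation).

-- shared primitive port: day.split(' ')  (exact: PySem.Chars.splitOn is s.split(sep) for nonempty sep)
def pySplitDay (s : String) : List String :=
  (PySem.Chars.splitOn s.toList [' ']).map String.ofList

-- ===== PORT A =====
def solution (id_list : List String) (k : Int) : Int :=
  (id_list.foldl
    (fun (st : PySem.Dict String Int × Int) each_id_list =>
      (PySem.Set.ofList (pySplitDay each_id_list)).foldl
        (fun (st : PySem.Dict String Int × Int) id =>
          if st.1.contains id && decide (st.1.getD id 0 < k) then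
            (st.1.insert id (st.1.getD id 0 + 1), st.2 + 1)
          else if !(st.1.contains id) then
            (st.1.insert id 1, st.2 + 1)
          else st) st)
    (PySem.Dict.empty, 0)).2

-- ===== PORT B =====
def solution_alt (id_list : List String) (k : Int) : Int :=
  let cap := max k 1
  let counts := id_list.foldl
    (fun (d : PySem.Dict String Int) day =>
      (PySem.Set.ofList (pySplitDay day)).foldl
        (fun d i => d.insert i (d.getD i 0 + 1)) d)
    PySem.Dict.empty
  (counts.values.map (fun c => min c cap)).sum

-- ===== PRECONDITION & SPEC =====
def Spec_solution (id_list : List String) (k : Int) (out : Int) : Prop := out = solution_alt id_list k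
instance (id_list : List String) (k : Int) (out : Int) : Decidable (Spec_solution id_list k out) := by unfold Spec_solution; infer_instance

-- ===== CLAIM (what is proved, stated in full; the proofs are below) =====
def Claim_equal_solution : Prop := ∀ (id_list : List String) (k : Int), Dom_solution id_list k → Spec_solution id_list k (solution id_list k)

-- ===== LEMMAS AND PROOFS =====

-- A's inner loop body, named for the proofs
def stepA (k : Int) (st : PySem.Dict String Int × Int) (id : String) : PySem.Dict String Int × Int :=
  if st.1.contains id && decide (st.1.getD id 0 < k) then
    (st.1.insert id (st.1.getD id 0 + 1), st.2 + 1)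
  else if !(st.1.contains id) then
    (st.1.insert id 1, st.2 + 1)
  else st

-- sum over a Nodup list when the summand changes at exactly one element
lemma sum_map_congr_except {α : Type} [DecidableEq α] (S : List α) (x : α) (f g : α → Int)
    (hx : x ∈ S) (hnd : S.Nodup)
    (h : ∀ u ∈ S, u ≠ x → f u = g u) :
    (S.map g).sum = (S.map f).sum + (g x - f x) := by
  induction S with
  | nil => cases hx
  | cons a S ih =>
    rcases List.mem_cons.mp hx with rfl | hxS
    · have hnx : x ∉ S := (List.nodup_cons.mp hnd).1
      have : S.map f = S.map g := List.map_congr_left (fun u hu => h u (List.mem_cons_of_mem _ hu) (fun e => hnx (e ▸ hu)))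
      simp [this]; ring
    · have ha : f a = g a := h a List.mem_cons_self (fun e => (List.nodup_cons.mp hnd).1 (e ▸ hxS))
      have := ih hxS (List.nodup_cons.mp hnd).2 (fun u hu => h u (List.mem_cons_of_mem _ hu))
      simp [this, ha]; ring

-- invariant of A's flattened loop: the dict holds min(count, max k 1) and the counter is its values' sum
lemma A_inv (k : Int) (l : List String) :
    (∀ u, (l.foldl (stepA k) (PySem.Dict.empty, 0)).1.get? u
        = if u ∈ l then some (min ((l.count u : Int)) (max k 1)) else none)
    ∧ (l.foldl (stepA k) (PySem.Dict.empty, 0)).2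
        = ((PySem.Set.ofList l).map (fun u => min ((l.count u : Int)) (max k 1))).sum := by
  induction l using List.reverseRecOn with
  | nil => constructor <;> simp [PySem.Dict.get?_empty, PySem.Set.ofList_nil]
  | append_singleton l x ih =>
    obtain ⟨ihd, ihs⟩ := ih
    rw [List.foldl_append]
    simp only [List.foldl_cons, List.foldl_nil]
    set st := l.foldl (stepA k) (PySem.Dict.empty, 0) with hst
    have hcont : st.1.contains x = decide (x ∈ l) := by
      rw [PySem.Dict.contains_eq_isSome_get?, ihd x]
      by_cases hx : x ∈ l <;> simp [hx]
    have hcx : List.count x (l ++ [x]) = List.count x l + 1 := by simp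
    have hcne : ∀ u, u ≠ x → List.count u (l ++ [x]) = List.count u l := by
      intro u hu
      have h0 : List.count u [x] = 0 := List.count_eq_zero.mpr (by simp [hu])
      simp [List.count_append, h0]
    by_cases hx : x ∈ l
    · -- x already counted: c ≥ 1
      have hc1 : 1 ≤ List.count x l := List.count_pos_iff.mpr hx
      have hgetD : st.1.getD x 0 = min ((l.count x : Int)) (max k 1) := by
        rw [PySem.Dict.getD_eq_get?_getD, ihd x]; simp [hx]
      have hset : PySem.Set.ofList (l ++ [x]) = PySem.Set.ofList l := by
        rw [PySem.Set.ofList_append_singleton, PySem.Set.add_of_mem (by simpa [PySem.Set.mem_ofList] using hx)]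
      by_cases hlt : st.1.getD x 0 < k
      · -- capped increment fires
        have hstep : stepA k st x = (st.1.insert x (st.1.getD x 0 + 1), st.2 + 1) := by
          simp [stepA, hcont, hx, hlt]
        rw [hstep]
        have hmin : min ((l.count x : Int)) (max k 1) + 1 = min (((l ++ [x]).count x : Int)) (max k 1) := by
          rw [hgetD] at hlt
          rw [hcx]; push_cast; omega
        constructor
        · intro u
          by_cases hu : u = x
          · subst hu
            rw [PySem.Dict.get?_insert_self, hgetD, hmin]
            simp [hx]
          · rw [PySem.Dict.get?_insert_of_ne _ _ hu, ihd u, hcne u hu]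
            simp [hu]
        · rw [hset, ihs,
            sum_map_congr_except (PySem.Set.ofList l) x
              (fun u => min ((l.count u : Int)) (max k 1))
              (fun u => min (((l ++ [x]).count u : Int)) (max k 1))
              (by simpa [PySem.Set.mem_ofList] using hx) (PySem.Set.nodup_ofList l)
              (fun u _ hu => by show min ((l.count u : Int)) (max k 1) = min (((l ++ [x]).count u : Int)) (max k 1); rw [hcne u hu])]
          simp only []
          rw [← hmin]; ring
      · -- cap reached (or k ≤ 0): no-op, and min(c+1, max k 1) = min(c, max k 1)
        have hstep : stepA k st x = st := by
          simp [stepA, hcont, hx, hlt]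
        rw [hstep]
        have hmin : min (((l ++ [x]).count x : Int)) (max k 1) = min ((l.count x : Int)) (max k 1) := by
          rw [hgetD] at hlt
          rw [hcx]; push_cast; omega
        constructor
        · intro u
          by_cases hu : u = x
          · subst hu; rw [ihd u, hmin]; simp [hx]
          · rw [ihd u, hcne u hu]
            simp [hu]
        · rw [hset, ihs]
          refine congrArg List.sum (List.map_congr_left fun u hu => ?_).symm
          by_cases hux : u = x
          · subst hux; rw [hmin]
          · rw [hcne u hux]
    · -- first appearance: unconditional grant of 1
      have hstep : stepA k st x = (st.1.insert x 1, st.2 + 1) := by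
        simp [stepA, hcont, hx]
      rw [hstep]
      have hone : min (((l ++ [x]).count x : Int)) (max k 1) = 1 := by
        rw [hcx, List.count_eq_zero_of_not_mem hx]
        push_cast; omega
      constructor
      · intro u
        by_cases hu : u = x
        · subst hu
          rw [PySem.Dict.get?_insert_self, hone]
          simp
        · rw [PySem.Dict.get?_insert_of_ne _ _ hu, ihd u, hcne u hu]
          simp [hu]
      · have hset : PySem.Set.ofList (l ++ [x]) = PySem.Set.ofList l ++ [x] := by
          rw [PySem.Set.ofList_append_singleton, PySem.Set.add_of_not_mem (by simpa [PySem.Set.mem_ofList] using hx)]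
        rw [hset, List.map_append, List.sum_append, ihs]
        have hsame : (PySem.Set.ofList l).map (fun u => min (((l ++ [x]).count u : Int)) (max k 1))
             = (PySem.Set.ofList l).map (fun u => min ((l.count u : Int)) (max k 1)) := by
          refine List.map_congr_left fun u hu => ?_
          have hu' : u ∈ l := (PySem.Set.mem_ofList _ _).mp hu
          rw [hcne u (fun e => hx (e ▸ hu'))]
        rw [hsame]
        simp [List.count_eq_zero_of_not_mem hx]

-- the flattened stream of per-day deduplicated ids
def flatIds (id_list : List String) : List String :=
  (id_list.map (fun s => PySem.Set.ofList (pySplitDay s))).flatten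

lemma solution_eq_flat (id_list : List String) (k : Int) :
    solution id_list k = ((flatIds id_list).foldl (stepA k) (PySem.Dict.empty, 0)).2 := by
  unfold solution flatIds stepA
  rw [List.foldl_flatten, List.foldl_map]

lemma solution_alt_eq_flat (id_list : List String) (k : Int) :
    solution_alt id_list k
      = ((PySem.Dict.counter (flatIds id_list)).values.map (fun c => min c (max k 1))).sum := by
  unfold solution_alt flatIds
  rw [← PySem.Dict.foldl_insert_getD_add_one_eq_counter, List.foldl_flatten, List.foldl_map]

-- ===== VERDICT (by name: the statement is the Claim_ definition above) =====
theorem solution_spec : Claim_equal_solution := by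
  intro id_list k _
  unfold Spec_solution
  rw [solution_eq_flat, solution_alt_eq_flat, (A_inv k (flatIds id_list)).2]
  have : (PySem.Dict.counter (flatIds id_list)).values
       = (PySem.Set.ofList (flatIds id_list)).map (fun u => (((flatIds id_list).count u : Int))) := by
    show (PySem.Dict.counter (flatIds id_list)).items.map Prod.snd = _
    rw [PySem.Dict.items_counter, List.map_map]
    rfl
  rw [this, List.map_map]
  rfl
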